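-- pv_equiv track=rewrite | github.com/efrenbl/code-navigator | src/codenav/mcp/server.py | _summarize_symbols
-- ===== SOURCE A (Python) =====
-- from typing import Any, Dict, List, Optional, Sequence
--
-- def _summarize_symbols(symbols: List[Dict]) -> str:
--     """Create a compact symbol summary."""
--     classes = [s for s in symbols if s.get("type") == "class"]
--     functions = [s for s in symbols if s.get("type") == "function"]
--     methods = [s for s in symbols if s.get("type") == "method"]
--
--     parts = []
--     if classes:
--         names = ", ".join(c["name"] for c in classes[:3])
--         if len(classes) > 3:
--             names += f"...+{len(classes)-3}"
--         parts.append(f"C:{names}")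
--     if functions:
--         names = ", ".join(f["name"] for f in functions[:3])
--         if len(functions) > 3:
--             names += f"...+{len(functions)-3}"
--         parts.append(f"F:{names}")
--     if methods:
--         parts.append(f"M:{len(methods)}")
--
--     return " ".join(parts) if parts else "empty"
-- ===== SOURCE B (Python) =====
-- def _summarize_symbols(symbols):
--     """Create a compact symbol summary (single bucketing pass + formatting)."""
--     first_classes, n_classes = [], 0
--     first_functions, n_functions = [], 0
--     n_methods = 0
--     for s in symbols:
--         t = s.get("type")
--         if t == "class":
--             n_classes += 1
--             if len(first_classes) < 3:
--                 first_classes.append(s)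
--         elif t == "function":
--             n_functions += 1
--             if len(first_functions) < 3:
--                 first_functions.append(s)
--         elif t == "method":
--             n_methods += 1
--
--     parts = []
--     if n_classes:
--         names = ", ".join(s["name"] for s in first_classes)
--         if n_classes > 3:
--             names += f"...+{n_classes - 3}"
--         parts.append(f"C:{names}")
--     if n_functions:
--         names = ", ".join(s["name"] for s in first_functions)
--         if n_functions > 3:
--             names += f"...+{n_functions - 3}"
--         parts.append(f"F:{names}")
--     if n_methods:
--         parts.append(f"M:{n_methods}")
--
--     return " ".join(parts) if parts else "empty"
-- ===== Notes on version B (the rewrite author's own statement) =====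
-- stated objective: alternative
-- what changed: Replaces A's three full list-comprehension passes over symbols with a single bucketing pass that maintains per-type counts and only the first three class/function dicts, then formats from those buckets.
import Mathlib
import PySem

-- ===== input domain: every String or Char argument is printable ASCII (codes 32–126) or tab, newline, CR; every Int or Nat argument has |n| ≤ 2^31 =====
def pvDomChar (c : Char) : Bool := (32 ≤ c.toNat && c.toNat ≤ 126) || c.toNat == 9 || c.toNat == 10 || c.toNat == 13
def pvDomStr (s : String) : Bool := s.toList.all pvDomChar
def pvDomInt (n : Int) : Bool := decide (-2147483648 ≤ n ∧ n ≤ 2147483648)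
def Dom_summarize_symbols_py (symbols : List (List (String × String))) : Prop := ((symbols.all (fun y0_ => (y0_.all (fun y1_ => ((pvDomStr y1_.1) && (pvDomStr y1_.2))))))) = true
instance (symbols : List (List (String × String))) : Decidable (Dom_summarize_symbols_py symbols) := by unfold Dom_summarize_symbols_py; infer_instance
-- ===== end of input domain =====

-- B replaces A's three filtering passes by one bucketing pass (counts + first three dicts per type); same output. Return-value equivalence only.


-- shared helper: Python d.get(k) / d[k] (first-match association-list lookup, via PySem.Dict)
def pvGetS (s : List (String × String)) (k : String) : Option String :=
  (PySem.Dict.mk s).get? k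

-- ===== PORT A =====
def summarize_symbols_py (symbols : List (List (String × String))) : String :=
  let classes := symbols.filter (fun s => pvGetS s "type" == some "class")
  let functions := symbols.filter (fun s => pvGetS s "type" == some "function")
  let methods := symbols.filter (fun s => pvGetS s "type" == some "method")
  let parts : List String := []
  let parts :=
    if classes ≠ [] then
      -- c["name"] raises KeyError when absent; Pre_ excludes that, the port uses "" there
      let names := PySem.Str.join ", " ((PySem.List.slice classes none (some 3)).map (fun c => (pvGetS c "name").getD ""))
      let names := if (classes.length : Int) > 3 then names ++ "...+" ++ PySem.Int.toStr ((classes.length : Int) - 3) else names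
      parts ++ ["C:" ++ names]
    else parts
  let parts :=
    if functions ≠ [] then
      let names := PySem.Str.join ", " ((PySem.List.slice functions none (some 3)).map (fun f => (pvGetS f "name").getD ""))
      let names := if (functions.length : Int) > 3 then names ++ "...+" ++ PySem.Int.toStr ((functions.length : Int) - 3) else names
      parts ++ ["F:" ++ names]
    else parts
  let parts :=
    if methods ≠ [] then parts ++ ["M:" ++ PySem.Int.toStr (methods.length : Int)] else parts
  if parts ≠ [] then PySem.Str.join " " parts else "empty"

-- ===== PORT B =====
-- bucketing state: (first three class dicts, #classes, first three function dicts, #functions, #methods)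
def pvStep (st : List (List (String × String)) × Int × List (List (String × String)) × Int × Int)
    (s : List (String × String)) :
    List (List (String × String)) × Int × List (List (String × String)) × Int × Int :=
  let (c3, cn, f3, fn, mn) := st
  let t := pvGetS s "type"
  if t == some "class" then (if c3.length < 3 then c3 ++ [s] else c3, cn + 1, f3, fn, mn)
  else if t == some "function" then (c3, cn, if f3.length < 3 then f3 ++ [s] else f3, fn + 1, mn)
  else if t == some "method" then (c3, cn, f3, fn, mn + 1)
  else st

def summarize_symbols_py_alt (symbols : List (List (String × String))) : String :=
  let st := symbols.foldl pvStep ([], 0, [], 0, 0)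
  let (c3, cn, f3, fn, mn) := st
  let parts : List String := []
  let parts :=
    if cn ≠ 0 then
      let names := PySem.Str.join ", " (c3.map (fun s => (pvGetS s "name").getD ""))
      let names := if cn > 3 then names ++ "...+" ++ PySem.Int.toStr (cn - 3) else names
      parts ++ ["C:" ++ names]
    else parts
  let parts :=
    if fn ≠ 0 then
      let names := PySem.Str.join ", " (f3.map (fun s => (pvGetS s "name").getD ""))
      let names := if fn > 3 then names ++ "...+" ++ PySem.Int.toStr (fn - 3) else names
      parts ++ ["F:" ++ names]
    else parts
  let parts :=
    if mn ≠ 0 then parts ++ ["M:" ++ PySem.Int.toStr mn] else parts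
  if parts ≠ [] then PySem.Str.join " " parts else "empty"

-- ===== PRECONDITION & SPEC =====
-- Pre_ excludes exactly the inputs where Python A raises KeyError: a "name" key missing
-- from one of the first three class- or function-typed symbols (the only names read).
def Pre_summarize_symbols_py (symbols : List (List (String × String))) : Prop :=
  (∀ s ∈ (symbols.filter (fun s => pvGetS s "type" == some "class")).take 3, (pvGetS s "name").isSome) ∧
  (∀ s ∈ (symbols.filter (fun s => pvGetS s "type" == some "function")).take 3, (pvGetS s "name").isSome)
instance (symbols : List (List (String × String))) : Decidable (Pre_summarize_symbols_py symbols) := by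
  unfold Pre_summarize_symbols_py; infer_instance

def pvWitness_summarize_symbols_py : (List (List (String × String))) :=
  [[("type", "class"), ("name", "A")], [("type", "method")]]

def Spec_summarize_symbols_py (symbols : List (List (String × String))) (out : String) : Prop := out = summarize_symbols_py_alt symbols
instance (symbols : List (List (String × String))) (out : String) : Decidable (Spec_summarize_symbols_py symbols out) := by unfold Spec_summarize_symbols_py; infer_instance

-- ===== CLAIM (what is proved, stated in full; the proofs are below) =====
def Claim_equal_summarize_symbols_py : Prop := ∀ (symbols : List (List (String × String))), Dom_summarize_symbols_py symbols → Pre_summarize_symbols_py symbols → Spec_summarize_symbols_py symbols (summarize_symbols_py symbols)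

-- ===== LEMMAS AND PROOFS =====

-- the bucketing fold computes the three filters' take-3 prefixes and lengths
theorem pvStep_foldl (symbols : List (List (String × String)))
    (c3 f3 : List (List (String × String))) (cn fn mn : Int)
    (hc : c3.length ≤ 3) (hf : f3.length ≤ 3) :
    symbols.foldl pvStep (c3, cn, f3, fn, mn) =
      (c3 ++ ((symbols.filter (fun s => pvGetS s "type" == some "class")).take (3 - c3.length)),
       cn + ((symbols.filter (fun s => pvGetS s "type" == some "class")).length : Int),
       f3 ++ ((symbols.filter (fun s => pvGetS s "type" == some "function")).take (3 - f3.length)),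
       fn + ((symbols.filter (fun s => pvGetS s "type" == some "function")).length : Int),
       mn + ((symbols.filter (fun s => pvGetS s "type" == some "method")).length : Int)) := by
  induction symbols generalizing c3 f3 cn fn mn with
  | nil => simp
  | cons s rest ih =>
    simp only [List.foldl_cons, List.filter_cons]
    by_cases h1 : pvGetS s "type" == some "class"
    · have h2 : (pvGetS s "type" == some "function") = false := by
        simp only [beq_iff_eq] at h1 ⊢; simp [h1]
      have h3 : (pvGetS s "type" == some "method") = false := by
        simp only [beq_iff_eq] at h1 ⊢; simp [h1]
      simp only [pvStep, h1, h2, h3, Bool.false_eq_true, if_false, if_true]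
      by_cases hlt : c3.length < 3
      · rw [if_pos hlt, ih _ _ _ _ _ (by simp; omega) hf]
        have h4 : 3 - c3.length = (3 - (c3.length + 1)) + 1 := by omega
        simp only [Prod.mk.injEq]
        and_intros <;> first
          | (simp only [List.length_cons]; push_cast; ring)
          | (rw [h4, List.take_succ_cons]; simp)
          | simp
      · rw [if_neg hlt, ih _ _ _ _ _ hc hf]
        have h0 : 3 - c3.length = 0 := by omega
        have h0' : 3 - (c3.length + 1) = 0 := by omega
        simp only [Prod.mk.injEq]
        and_intros <;> first
          | (simp only [List.length_cons]; push_cast; ring)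
          | simp [h0]
    · simp only [Bool.not_eq_true] at h1
      by_cases h2 : pvGetS s "type" == some "function"
      · have h3 : (pvGetS s "type" == some "method") = false := by
          simp only [beq_iff_eq] at h2 ⊢; simp [h2]
        simp only [pvStep, h1, h2, h3, Bool.false_eq_true, if_false, if_true]
        by_cases hlt : f3.length < 3
        · rw [if_pos hlt, ih _ _ _ _ _ hc (by simp; omega)]
          have h4 : 3 - f3.length = (3 - (f3.length + 1)) + 1 := by omega
          simp only [Prod.mk.injEq]
          and_intros <;> first
            | (simp only [List.length_cons]; push_cast; ring)
            | (rw [h4, List.take_succ_cons]; simp)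
            | simp
        · rw [if_neg hlt, ih _ _ _ _ _ hc hf]
          have h0 : 3 - f3.length = 0 := by omega
          have h0' : 3 - (f3.length + 1) = 0 := by omega
          simp only [Prod.mk.injEq]
          and_intros <;> first
            | (simp only [List.length_cons]; push_cast; ring)
            | simp [h0]
      · by_cases h3 : pvGetS s "type" == some "method"
        · simp only [pvStep, h1, h2, h3, Bool.false_eq_true, if_false, if_true]
          rw [ih _ _ _ _ _ hc hf]
          simp only [Prod.mk.injEq]
          and_intros <;> first
            | (simp only [List.length_cons]; push_cast; ring)
            | trivial
        · simp only [Bool.not_eq_true] at h2 h3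
          simp only [pvStep, h1, h2, h3, Bool.false_eq_true, if_false]
          rw [ih _ _ _ _ _ hc hf]

-- ===== VERDICT (by name: the statement is the Claim_ definition above) =====
theorem summarize_symbols_py_spec : Claim_equal_summarize_symbols_py := by
  intro symbols _ _
  unfold Spec_summarize_symbols_py summarize_symbols_py summarize_symbols_py_alt
  rw [pvStep_foldl symbols [] [] 0 0 0 (by simp) (by simp)]
  have hslice : ∀ (xs : List (List (String × String))),
      PySem.List.slice xs none (some 3) = xs.take 3 := fun xs => by
    simpa using PySem.List.slice_to xs (b := 3) (by norm_num)
  simp only [hslice, List.nil_append, zero_add, List.length_nil, Nat.sub_zero,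
    ne_eq, Nat.cast_eq_zero, List.length_eq_zero_iff]
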